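-- pv_equiv track=rewrite | github.com/yamaton/CodeForces | problemSet/507A-Amr_and_Music.py | solve
-- ===== SOURCE A (Python) =====
-- import operator
--
-- def solve(xs, k):
--     if k == 0:
--         return []
--
--     indexed_xs = list(enumerate(xs, 1))
--     indexed_xs.sort(key=operator.itemgetter(1))
--     acc = 0
--     result = []
--     for i, x in indexed_xs:
--         acc += x
--         if acc <= k:
--             result.append(i)
--         else:
--             break
--     return sorted(result)
-- ===== SOURCE B (Python) =====
-- def solve(xs, k):
--     if k == 0:
--         return []
--     remaining = list(enumerate(xs, 1))
--     acc = 0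
--     chosen = []
--     while remaining:
--         p = min(remaining, key=lambda t: t[1])
--         acc += p[1]
--         if acc > k:
--             break
--         chosen.append(p[0])
--         remaining.remove(p)
--     return sorted(chosen)
-- ===== Notes on version B (the rewrite author's own statement) =====
-- stated objective: alternative
-- what changed: A sorts the whole indexed list once and then scans it with a running sum and break; B never sorts the input: it runs a selection-style greedy, repeatedly extracting the first minimum-cost pair from the remaining list (min + remove) until the budget is exceeded, and only sorts the chosen indices at the end.
import Mathlib
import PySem

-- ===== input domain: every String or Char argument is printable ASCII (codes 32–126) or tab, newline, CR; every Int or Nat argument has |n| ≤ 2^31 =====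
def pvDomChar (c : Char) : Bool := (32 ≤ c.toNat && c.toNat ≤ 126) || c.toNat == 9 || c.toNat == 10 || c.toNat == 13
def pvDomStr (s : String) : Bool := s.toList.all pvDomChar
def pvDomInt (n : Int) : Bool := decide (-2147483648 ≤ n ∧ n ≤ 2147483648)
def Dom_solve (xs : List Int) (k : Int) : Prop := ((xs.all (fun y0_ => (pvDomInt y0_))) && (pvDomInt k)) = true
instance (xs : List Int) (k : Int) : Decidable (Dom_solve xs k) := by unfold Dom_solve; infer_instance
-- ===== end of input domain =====

-- B replaces A's sort-then-scan by a selection-style greedy: repeatedly extract the first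
-- minimum-cost remaining pair until the budget is exceeded (no sort of the input).

-- ===== PORT A =====
-- the for-loop over the sorted pairs: acc and result are the loop state; 'break' returns result as built so far
def solveLoopA (k : Int) : List (Int × Int) → Int → List Int → List Int
  | [], _, res => res
  | (i, x) :: rest, acc, res =>
      if acc + x ≤ k then solveLoopA k rest (acc + x) (res ++ [i]) else res

def solve (xs : List Int) (k : Int) : List Int :=
  if k = 0 then []
  else
    let indexed := PySem.List.sorted (PySem.List.enumerate xs 1) (fun p => p.2)
    PySem.List.sorted (solveLoopA k indexed 0 []) (fun i => i)

-- ===== PORT B =====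
-- the while loop of Source B, with fuel = length of `remaining` (each iteration removes one pair):
-- p = min(remaining, key=...); acc += p[1]; if acc > k: break; chosen.append(p[0]); remaining.remove(p)
def solveLoopB (k : Int) : Nat → List (Int × Int) → Int → List Int → List Int
  | 0, _, _, chosen => chosen
  | fuel + 1, remaining, acc, chosen =>
      match PySem.List.min? remaining (fun t => t.2) with
      | none => chosen              -- remaining is empty: the while loop exits
      | some p =>
          if acc + p.2 > k then chosen
          else
            match PySem.List.remove? remaining p with
            | none => chosen        -- unreachable: p ∈ remaining
            | some rest => solveLoopB k fuel rest (acc + p.2) (chosen ++ [p.1])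

def solve_alt (xs : List Int) (k : Int) : List Int :=
  if k = 0 then []
  else
    let remaining := PySem.List.enumerate xs 1
    PySem.List.sorted (solveLoopB k remaining.length remaining 0 []) (fun i => i)

-- ===== PRECONDITION & SPEC =====
def Spec_solve (xs : List Int) (k : Int) (out : List Int) : Prop := out = solve_alt xs k
instance (xs : List Int) (k : Int) (out : List Int) : Decidable (Spec_solve xs k out) := by unfold Spec_solve; infer_instance

-- ===== CLAIM (what is proved, stated in full; the proofs are below) =====
def Claim_equal_solve : Prop := ∀ (xs : List Int) (k : Int), Dom_solve xs k → Spec_solve xs k (solve xs k)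

-- ===== LEMMAS AND PROOFS =====

-- `minFold a t` is the value of Python's running-min fold started at a (first minimum wins)
def minFold (a : Int × Int) (t : List (Int × Int)) : Int × Int :=
  t.foldl (fun m x => if x.2 < m.2 then x else m) a

theorem min?_cons_eq_minFold (a : Int × Int) (t : List (Int × Int)) :
    PySem.List.min? (a :: t) (fun p => p.2) = some (minFold a t) := by
  simp only [PySem.List.min?, List.foldl_cons, minFold]
  induction t generalizing a with
  | nil => rfl
  | cons y t ih =>
      simp only [List.foldl_cons]
      by_cases h : y.2 < a.2 <;> simp [h, ih]

theorem minFold_le (t : List (Int × Int)) : ∀ (a : Int × Int),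
    (minFold a t).2 ≤ a.2 ∧ ∀ y ∈ t, (minFold a t).2 ≤ y.2 := by
  induction t with
  | nil => intro a; simp [minFold]
  | cons y t ih =>
      intro a
      by_cases h : y.2 < a.2
      · have := ih y
        refine ⟨by simpa [minFold, h] using le_of_lt (lt_of_le_of_lt this.1 h), ?_⟩
        intro z hz
        rcases List.mem_cons.mp hz with rfl | hz
        · simpa [minFold, h] using this.1
        · simpa [minFold, h] using this.2 z hz
      · have := ih a
        refine ⟨by simpa [minFold, h] using this.1, ?_⟩
        intro z hz
        rcases List.mem_cons.mp hz with rfl | hz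
        · have := this.1
          simp only [minFold, List.foldl_cons, if_neg h] at *
          omega
        · simpa [minFold, h] using this.2 z hz

-- the first-minimum splits the list: strictly larger elements before it, ≥ elements after it
theorem minFold_split (t : List (Int × Int)) : ∀ (a : Int × Int),
    ∃ pre suf, a :: t = pre ++ minFold a t :: suf ∧
      (∀ p ∈ pre, (minFold a t).2 < p.2) ∧ (∀ y ∈ suf, (minFold a t).2 ≤ y.2) := by
  induction t with
  | nil => intro a; exact ⟨[], [], by simp [minFold]⟩
  | cons y t ih =>
      intro a
      by_cases h : y.2 < a.2
      · obtain ⟨pre, suf, heq, hpre, hsuf⟩ := ih y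
        have hm : minFold a (y :: t) = minFold y t := by simp [minFold, h]
        refine ⟨a :: pre, suf, ?_, ?_, ?_⟩
        · rw [hm]; simpa using congrArg (a :: ·) heq
        · intro p hp
          rcases List.mem_cons.mp hp with rfl | hp
          · exact hm ▸ lt_of_le_of_lt (minFold_le t y).1 h
          · exact hm ▸ hpre p hp
        · intro z hz; exact hm ▸ hsuf z hz
      · obtain ⟨pre, suf, heq, hpre, hsuf⟩ := ih a
        have hm : minFold a (y :: t) = minFold a t := by simp [minFold, h]
        cases pre with
        | nil =>
            -- minFold a t = a
            have ha : a = minFold a t := by simpa using congrArg (fun l => l.headI) heq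
            have htl : t = suf := by simpa [← ha] using congrArg List.tail heq
            refine ⟨[], y :: t, by simp [hm, ← ha], by simp, ?_⟩
            intro z hz
            rcases List.mem_cons.mp hz with rfl | hz
            · rw [hm, ← ha]; omega
            · exact hm ▸ hsuf z (htl ▸ hz)
        | cons b pre' =>
            have hb : a = b := by simpa using congrArg (fun l => l.headI) heq
            have htl : t = pre' ++ minFold a t :: suf := by
              simpa using congrArg List.tail heq
            have hax : (minFold a t).2 < a.2 := hb ▸ hpre b (by simp)
            refine ⟨a :: y :: pre', suf, ?_, ?_, fun z hz => hm ▸ hsuf z hz⟩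
            · rw [hm]
              conv_lhs => rw [htl]
              simp
            · intro p hp
              rcases List.mem_cons.mp hp with rfl | hp
              · exact hm ▸ hax
              · rcases List.mem_cons.mp hp with rfl | hp
                · rw [hm]; omega
                · exact hm ▸ hpre p (by simp [hp])

-- insertBy puts x in front of a list of strictly larger keys
theorem insertBy_front (m : Int × Int) (ys : List (Int × Int))
    (h : ∀ a ∈ ys, m.2 < a.2) :
    PySem.List.insertBy (fun a b => decide (a.2 < b.2)) m ys = m :: ys := by
  cases ys with
  | nil => rfl
  | cons a l => simp [PySem.List.insertBy, h a (by simp)]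

-- folding insertions of elements with keys ≥ m.2 over (m :: acc) keeps m in front
theorem foldl_ins_skip (m : Int × Int) (t : List (Int × Int)) : ∀ (acc : List (Int × Int)),
    (∀ y ∈ t, m.2 ≤ y.2) →
    t.foldl (fun acc x => PySem.List.insertBy (fun a b => decide (a.2 < b.2)) x acc) (m :: acc)
      = m :: t.foldl (fun acc x => PySem.List.insertBy (fun a b => decide (a.2 < b.2)) x acc) acc := by
  induction t with
  | nil => intro acc _; rfl
  | cons y t ih =>
      intro acc hle
      have hy : ¬ (y.2 < m.2) := not_lt.mpr (hle y (by simp))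
      simp only [List.foldl_cons, PySem.List.insertBy, decide_eq_true_eq, if_neg hy]
      exact ih _ (fun z hz => hle z (by simp [hz]))

-- the selection decomposition of Python's stable sort:
-- sorted L = (first minimum) :: sorted (L with it removed)
theorem sorted_sel (pre suf : List (Int × Int)) (m : Int × Int)
    (hpre : ∀ p ∈ pre, m.2 < p.2) (hsuf : ∀ y ∈ suf, m.2 ≤ y.2) :
    PySem.List.sorted (pre ++ m :: suf) (fun p => p.2)
      = m :: PySem.List.sorted (pre ++ suf) (fun p => p.2) := by
  rw [PySem.List.sorted_eq_foldl_insertBy, PySem.List.sorted_eq_foldl_insertBy]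
  rw [List.foldl_append, List.foldl_append, List.foldl_cons]
  rw [insertBy_front m _ (fun a ha => hpre a (by
        have := (PySem.List.mem_sorted (xs := pre) (key := fun p => p.2) (rev := false) (x := a)).mp
        rw [PySem.List.sorted_eq_foldl_insertBy] at this
        exact this ha))]
  exact foldl_ins_skip m suf _ hsuf

-- one unfolding of B's while loop equals one step of A's loop over the sorted list
theorem solveLoopB_eq (k : Int) (fuel : Nat) : ∀ (L : List (Int × Int)) (acc : Int) (chosen : List Int),
    L.length ≤ fuel →
    solveLoopB k fuel L acc chosen
      = solveLoopA k (PySem.List.sorted L (fun p => p.2)) acc chosen := by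
  induction fuel with
  | zero =>
      intro L acc chosen hlen
      have : L = [] := List.length_eq_zero_iff.mp (Nat.le_zero.mp hlen)
      subst this; rfl
  | succ fuel ih =>
      intro L acc chosen hlen
      cases L with
      | nil => rfl
      | cons a t =>
          obtain ⟨pre, suf, heq, hpre, hsuf⟩ := minFold_split t a
          set m := minFold a t with hm
          rw [heq]
          have hnotpre : m ∉ pre := fun h => absurd (hpre m h) (lt_irrefl _)
          have herase : (pre ++ m :: suf).erase m = pre ++ suf := by
            rw [List.erase_append_right _ hnotpre, List.erase_cons_head]
          have hmem : m ∈ pre ++ m :: suf := by simp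
          have hrem : PySem.List.remove? (pre ++ m :: suf) m = some (pre ++ suf) := by
            rw [PySem.List.remove?_eq_some_erase _ m hmem, herase]
          have hmin : PySem.List.min? (pre ++ m :: suf) (fun t => t.2) = some m := by
            rw [← heq]; exact min?_cons_eq_minFold a t
          rw [sorted_sel pre suf m hpre hsuf]
          simp only [solveLoopB, hmin, hrem]
          obtain ⟨i, x⟩ := m
          simp only [solveLoopA]
          by_cases hk : acc + x ≤ k
          · rw [if_neg (by omega), if_pos hk]
            have hlen' : (pre ++ suf).length ≤ fuel := by
              have hlen2 := congrArg List.length heq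
              simp at hlen2 hlen ⊢
              omega
            exact ih (pre ++ suf) (acc + x) (chosen ++ [i]) hlen'
          · rw [if_pos (by omega), if_neg hk]

-- ===== VERDICT (by name: the statement is the Claim_ definition above) =====
theorem solve_spec : Claim_equal_solve := by
  intro xs k _
  unfold Spec_solve solve solve_alt
  by_cases hk : k = 0
  · simp [hk]
  · simp only [if_neg hk]
    rw [solveLoopB_eq k _ _ 0 [] le_rfl]
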